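-- pv_equiv track=rewrite | github.com/3IVIS/pyrere | pyrere/utils/spatial.py | find_owner
-- ===== SOURCE A (Python) =====
-- def find_owner(
--     entries: list[tuple[int, int, str]],
--     line: int,
-- ) -> str | None:
--     """
--     Walk the sorted entry list and return the node_id of the innermost span
--     containing `line`.  Returns None if no span matches.
--     """
--     best_id: str | None = None
--     best_span = 10**9
--     for start, end, node_id in entries:
--         if start <= line <= end:
--             span = end - start
--             if span < best_span:
--                 best_span = span
--                 best_id = node_id
--     return best_id
-- ===== SOURCE B (Python) =====
-- def find_owner(
--     entries: list[tuple[int, int, str]],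
--     line: int,
-- ) -> str | None:
--     """Sort entries by span (stable), return the first containing span's id."""
--     for start, end, node_id in sorted(entries, key=lambda t: t[1] - t[0]):
--         if start <= line <= end:
--             return node_id
--     return None
-- ===== Notes on version B (the rewrite author's own statement) =====
-- stated objective: alternative
-- what changed: Replaces the min-tracking accumulator scan by a stable sort on span followed by a first-match scan, and drops A's 10**9 sentinel so arbitrarily large containing spans are found.
-- intended difference: On inputs where some span contains line but every containing span is at least 10**9 wide, A returns None because of its best_span=10**9 sentinel, while B returns the innermost containing span's node_id, which is what the docstring promises. — e.g. on find_owner([(0, 1000000000, "a")], 0): A returns none, B returns some "a"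
import Mathlib
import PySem

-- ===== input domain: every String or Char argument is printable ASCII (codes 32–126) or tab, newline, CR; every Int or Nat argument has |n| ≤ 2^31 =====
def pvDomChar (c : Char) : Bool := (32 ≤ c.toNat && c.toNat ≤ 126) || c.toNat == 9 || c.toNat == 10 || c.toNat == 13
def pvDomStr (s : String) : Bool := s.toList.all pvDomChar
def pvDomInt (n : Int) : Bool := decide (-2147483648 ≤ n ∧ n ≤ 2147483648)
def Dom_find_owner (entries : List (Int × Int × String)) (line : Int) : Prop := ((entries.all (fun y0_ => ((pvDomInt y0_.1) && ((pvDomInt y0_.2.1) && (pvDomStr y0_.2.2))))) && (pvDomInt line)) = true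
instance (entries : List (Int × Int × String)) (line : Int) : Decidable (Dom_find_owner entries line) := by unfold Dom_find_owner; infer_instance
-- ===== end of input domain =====

-- B replaces A's min-tracking scan by a stable sort on span followed by a first-match scan (alternative
-- decomposition, not faster); unlike A it has no 10**9 sentinel, so spans ≥ 10**9 are found (see D_).


-- ===== PORT A =====
-- literal port of A: fold over entries tracking (best_id, best_span), best_span starts at 10^9
def find_owner (entries : List (Int × Int × String)) (line : Int) : Option String :=
  (entries.foldl
    (fun (acc : Option String × Int) t =>
      if t.1 ≤ line ∧ line ≤ t.2.1 then
        let span := t.2.1 - t.1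
        if span < acc.2 then (some t.2.2, span) else acc
      else acc)
    (none, 10 ^ 9)).1

-- ===== PORT B =====
-- literal port of B: stable sort by span, then first entry containing line
def find_owner_alt (entries : List (Int × Int × String)) (line : Int) : Option String :=
  ((PySem.List.sorted entries (fun t => t.2.1 - t.1)).find?
      (fun t => decide (t.1 ≤ line) && decide (line ≤ t.2.1))).map (fun t => t.2.2)

-- ===== PRECONDITION & SPEC =====
-- On inputs where some span contains line but every containing span is ≥ 10^9 wide, A returns none
-- (its best_span = 10^9 sentinel), while B returns the innermost containing span's node_id, which is
-- what the docstring promises.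
def D_find_owner (entries : List (Int × Int × String)) (line : Int) : Prop :=
  (∃ t ∈ entries, t.1 ≤ line ∧ line ≤ t.2.1) ∧
  (∀ t ∈ entries, t.1 ≤ line → line ≤ t.2.1 → 10 ^ 9 ≤ t.2.1 - t.1)
instance (entries : List (Int × Int × String)) (line : Int) : Decidable (D_find_owner entries line) := by
  unfold D_find_owner; infer_instance
def Spec_find_owner (entries : List (Int × Int × String)) (line : Int) (out : Option String) : Prop :=
  ¬ D_find_owner entries line → out = find_owner_alt entries line
instance (entries : List (Int × Int × String)) (line : Int) (out : Option String) : Decidable (Spec_find_owner entries line out) := by unfold Spec_find_owner; infer_instance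
def pvDiffWitness_find_owner : (List (Int × Int × String)) × Int := ([(0, 1000000000, "a")], 0)
def pvDiffWitnessOut_find_owner : (Option String) × (Option String) := (none, some "a")

-- ===== CLAIM (what is proved, stated in full; the proofs are below) =====
def Claim_unchanged_find_owner : Prop := ∀ (entries : List (Int × Int × String)) (line : Int), Dom_find_owner entries line → Spec_find_owner entries line (find_owner entries line)
def Claim_changed_find_owner : Prop := Dom_find_owner (pvDiffWitness_find_owner.1) (pvDiffWitness_find_owner.2) ∧ D_find_owner (pvDiffWitness_find_owner.1) (pvDiffWitness_find_owner.2) ∧ find_owner (pvDiffWitness_find_owner.1) (pvDiffWitness_find_owner.2) = pvDiffWitnessOut_find_owner.1 ∧ find_owner_alt (pvDiffWitness_find_owner.1) (pvDiffWitness_find_owner.2) = pvDiffWitnessOut_find_owner.2 ∧ pvDiffWitnessOut_find_owner.1 ≠ pvDiffWitnessOut_find_owner.2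
def Claim_exact_find_owner : Prop := ∀ (entries : List (Int × Int × String)) (line : Int), Dom_find_owner entries line → D_find_owner entries line → find_owner entries line ≠ find_owner_alt entries line

-- ===== LEMMAS AND PROOFS =====

-- abbreviations used only in the proofs
def pvKey (t : Int × Int × String) : Int := t.2.1 - t.1
def pvP (line : Int) (t : Int × Int × String) : Bool :=
  decide (t.1 ≤ line) && decide (line ≤ t.2.1)
def pvStep (line : Int) (acc : Option String × Int) (t : Int × Int × String) :
    Option String × Int :=
  if t.1 ≤ line ∧ line ≤ t.2.1 then
    if t.2.1 - t.1 < acc.2 then (some t.2.2, t.2.1 - t.1) else acc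
  else acc

theorem pvFind_owner_eq (entries : List (Int × Int × String)) (line : Int) :
    find_owner entries line = (entries.foldl (pvStep line) (none, 10 ^ 9)).1 := rfl

-- inserting a non-matching element does not change the first match
theorem pvFind_insertBy_neg (line : Int) (x : Int × Int × String)
    (s : List (Int × Int × String)) (hx : pvP line x = false) :
    (PySem.List.insertBy (fun a b => decide (pvKey a < pvKey b)) x s).find? (pvP line)
      = s.find? (pvP line) := by
  induction s with
  | nil => simp [PySem.List.insertBy, hx]
  | cons y ys ih =>
    simp only [PySem.List.insertBy]
    by_cases h : pvKey x < pvKey y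
    · simp [h, List.find?, hx]
    · simp only [decide_eq_true_eq] at *
      simp only [if_neg h, List.find?]
      cases hy : pvP line y with
      | true => simp
      | false => simpa [hy] using ih

-- inserting a matching element into a key-sorted list: the first match is x or the old first match,
-- whichever has the smaller key (x on ties of key, since x is inserted after equal keys)
theorem pvFind_insertBy_pos (line : Int) (x : Int × Int × String)
    (s : List (Int × Int × String)) (hs : s.Pairwise (fun a b => pvKey a ≤ pvKey b))
    (hx : pvP line x = true) :
    (PySem.List.insertBy (fun a b => decide (pvKey a < pvKey b)) x s).find? (pvP line)
      = match s.find? (pvP line) with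
        | none => some x
        | some h => if pvKey x < pvKey h then some x else some h := by
  induction s with
  | nil => simp [PySem.List.insertBy, hx]
  | cons y ys ih =>
    simp only [PySem.List.insertBy]
    rcases List.pairwise_cons.mp hs with ⟨hy_le, hys⟩
    by_cases h : pvKey x < pvKey y
    · simp only [decide_eq_true_eq, if_pos h]
      rw [List.find?_cons_of_pos hx]
      cases hfy : (y :: ys).find? (pvP line) with
      | none => rfl
      | some z =>
        have hz : z ∈ y :: ys := List.mem_of_find?_eq_some hfy
        have hyz : pvKey y ≤ pvKey z := by
          cases hz with
          | head => exact le_rfl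
          | tail _ hz => exact hy_le z hz
        simp [if_pos (lt_of_lt_of_le h hyz)]
    · simp only [decide_eq_true_eq, if_neg h]
      cases hy : pvP line y with
      | true =>
        rw [List.find?_cons_of_pos hy, List.find?_cons_of_pos hy]
        simp [if_neg h]
      | false =>
        rw [List.find?_cons_of_neg (by simp [hy]),
            List.find?_cons_of_neg (by simp [hy])]
        exact ih hys

-- sorted of a snoc is insertBy into sorted
theorem pvSorted_concat (l : List (Int × Int × String)) (x : Int × Int × String) :
    PySem.List.sorted (l ++ [x]) pvKey
      = PySem.List.insertBy (fun a b => decide (pvKey a < pvKey b)) x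
          (PySem.List.sorted l pvKey) := by
  rw [PySem.List.sorted_eq_foldl_insertBy, PySem.List.sorted_eq_foldl_insertBy,
    List.foldl_append]
  rfl

-- the master invariant: A's fold state is determined by the first match of the sorted list
theorem pvInvariant (line : Int) (l : List (Int × Int × String)) :
    l.foldl (pvStep line) (none, 10 ^ 9)
      = match (PySem.List.sorted l pvKey).find? (pvP line) with
        | none => (none, 10 ^ 9)
        | some h => if pvKey h < 10 ^ 9 then (some h.2.2, pvKey h) else (none, 10 ^ 9) := by
  induction l using List.reverseRecOn with
  | nil => simp [PySem.List.sorted]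
  | append_singleton l x ih =>
    rw [List.foldl_append, pvSorted_concat]
    simp only [List.foldl_cons, List.foldl_nil]
    have hsorted : (PySem.List.sorted l pvKey).Pairwise (fun a b => pvKey a ≤ pvKey b) :=
      PySem.List.sorted_pairwise l pvKey
    by_cases hx : x.1 ≤ line ∧ line ≤ x.2.1
    · have hxp : pvP line x = true := by simp [pvP, hx.1, hx.2]
      rw [pvFind_insertBy_pos line x _ hsorted hxp, ih]
      cases hf : (PySem.List.sorted l pvKey).find? (pvP line) with
      | none =>
        simp [pvStep, if_pos hx, pvKey]
      | some h =>
        simp only []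
        by_cases hh : pvKey h < 10 ^ 9 <;> by_cases hc : pvKey x < pvKey h
        · rw [if_pos hh, if_pos hc]
          simp only [pvKey] at hh hc
          simp only [pvStep, if_pos hx, pvKey]
          split_ifs <;> first | rfl | omega
        · rw [if_pos hh, if_neg hc]
          simp only [pvKey] at hh hc
          simp only [pvStep, if_pos hx, pvKey]
          split_ifs
          rfl
        · rw [if_neg hh, if_pos hc]
          simp only [pvKey] at hh hc
          simp only [pvStep, if_pos hx, pvKey]
        · rw [if_neg hh, if_neg hc]
          simp only [pvKey] at hh hc
          simp only [pvStep, if_pos hx, pvKey]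
          split_ifs <;> first | rfl | omega
    · have hxp : pvP line x = false := by
        simp only [pvP]
        rcases not_and_or.mp hx with h | h <;> simp [h]
      rw [pvFind_insertBy_neg line x _ hxp, ih]
      have hstep : pvStep line (l.foldl (pvStep line) (none, 10 ^ 9)) x
          = l.foldl (pvStep line) (none, 10 ^ 9) := by
        simp [pvStep, hx]
      rw [← ih, hstep, ih]

-- membership in the sorted list and entries agree
theorem pvMem_sorted (l : List (Int × Int × String)) (t : Int × Int × String) :
    t ∈ PySem.List.sorted l pvKey ↔ t ∈ l :=
  PySem.List.mem_sorted l pvKey false t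

-- if the first match exists, its key is minimal among all matching keys
theorem pvFirstMatch_min (line : Int) (l : List (Int × Int × String))
    (h : Int × Int × String)
    (hf : (PySem.List.sorted l pvKey).find? (pvP line) = some h)
    (m : Int × Int × String) (hm : m ∈ l) (hmp : pvP line m = true) :
    pvKey h ≤ pvKey m := by
  rcases List.find?_eq_some_iff_append.mp hf with ⟨hph, as, bs, heq, has⟩
  have hmem : m ∈ PySem.List.sorted l pvKey := (pvMem_sorted l m).mpr hm
  rw [heq] at hmem
  have hsorted := PySem.List.sorted_pairwise l pvKey
  rw [heq] at hsorted
  rcases List.mem_append.mp hmem with hma | hmb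
  · exact absurd hmp (by simpa using has m hma)
  · cases hmb with
    | head => exact le_rfl
    | tail _ hmb => exact List.rel_of_pairwise_cons (List.pairwise_append.mp hsorted).2.1 hmb

-- ===== VERDICT (by name: the statement is the Claim_ definition above) =====
theorem find_owner_spec : Claim_unchanged_find_owner := by
  intro entries line _ hnd
  rw [pvFind_owner_eq, pvInvariant line entries]
  unfold find_owner_alt
  cases hf : (PySem.List.sorted entries pvKey).find? (pvP line) with
  | none =>
    have : (PySem.List.sorted entries (fun t => t.2.1 - t.1)).find?
        (fun t => decide (t.1 ≤ line) && decide (line ≤ t.2.1)) = none := hf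
    simp [this]
  | some h =>
    have hh : pvKey h < 10 ^ 9 := by
      by_contra hge
      apply hnd
      have hmem : h ∈ entries := (pvMem_sorted entries h).mp (List.mem_of_find?_eq_some hf)
      have hph : pvP line h = true := List.find?_some hf
      simp only [pvP, Bool.and_eq_true, decide_eq_true_eq] at hph
      refine ⟨⟨h, hmem, hph.1, hph.2⟩, ?_⟩
      intro t ht h1 h2
      have htp : pvP line t = true := by simp [pvP, h1, h2]
      have := pvFirstMatch_min line entries h hf t ht htp
      have := not_lt.mp hge
      simp only [pvKey] at *
      omega
    have hfb : (PySem.List.sorted entries (fun t => t.2.1 - t.1)).find?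
        (fun t => decide (t.1 ≤ line) && decide (line ≤ t.2.1)) = some h := hf
    rw [hfb]
    simp only []
    rw [if_pos hh]
    simp

theorem find_owner_changed : Claim_changed_find_owner := by
  unfold Claim_changed_find_owner; decide

theorem find_owner_tight : Claim_exact_find_owner := by
  intro entries line _ hd
  rcases hd with ⟨⟨m, hm, hm1, hm2⟩, hall⟩
  have hmp : pvP line m = true := by simp [pvP, hm1, hm2]
  rw [pvFind_owner_eq, pvInvariant line entries]
  unfold find_owner_alt
  cases hf : (PySem.List.sorted entries pvKey).find? (pvP line) with
  | none =>
    exfalso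
    have : m ∈ PySem.List.sorted entries pvKey := (pvMem_sorted entries m).mpr hm
    have := List.find?_eq_none.mp hf m this
    exact absurd hmp (by simpa using this)
  | some h =>
    have hmem : h ∈ entries := (pvMem_sorted entries h).mp (List.mem_of_find?_eq_some hf)
    have hph : pvP line h = true := List.find?_some hf
    simp only [pvP, Bool.and_eq_true, decide_eq_true_eq] at hph
    have hge : 10 ^ 9 ≤ pvKey h := hall h hmem hph.1 hph.2
    have hh : ¬ pvKey h < 10 ^ 9 := not_lt.mpr hge
    have hfb : (PySem.List.sorted entries (fun t => t.2.1 - t.1)).find?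
        (fun t => decide (t.1 ≤ line) && decide (line ≤ t.2.1)) = some h := hf
    rw [hfb]
    simp only []
    rw [if_neg hh]
    simp
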